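-- pv_equiv track=rewrite | github.com/SEPTIAN2403010157/uts-semester2 | soal 2 uts.py | cariRelikTerkuat
-- ===== SOURCE A (Python) =====
-- def cariRelikTerkuat(arr, n):
--     nilai_terbesar = 0
--     indeks_terkuat = -1
--
--     for i in range(n):
--         count = 0
--         for j in range(i + 1, n):
--             if arr[j] < arr[i]:
--                 count += 1
--         nilai_efektif = arr[i] * count
--         if nilai_efektif > nilai_terbesar:
--             nilai_terbesar = nilai_efektif
--             indeks_terkuat = i
--
--     return nilai_terbesar, indeks_terkuat
-- ===== SOURCE B (Python) =====
-- def cariRelikTerkuat(arr, n):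
--     m = n if n > 0 else 0
--     prefix = arr[:m]
--     # right-to-left pass: keep already-seen suffix sorted; the insertion
--     # position of x is exactly the number of later elements smaller than x
--     seen = []
--     counts = []
--     for x in reversed(prefix):
--         pos = 0
--         while pos < len(seen) and seen[pos] < x:
--             pos += 1
--         counts.append(pos)
--         seen.insert(pos, x)
--     counts.reverse()
--     best, idx, i = 0, -1, 0
--     for x, c in zip(prefix, counts):
--         v = x * c
--         if v > best:
--             best, idx = v, i
--         i += 1
--     return best, idx
-- ===== Notes on version B (the rewrite author's own statement) =====
-- stated objective: alternative
-- what changed: Replaces A's nested count-smaller-to-the-right loops by a single right-to-left pass that keeps the already-seen suffix sorted, reading each right-smaller count off as the insertion position, then one selection pass.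
import Mathlib
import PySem

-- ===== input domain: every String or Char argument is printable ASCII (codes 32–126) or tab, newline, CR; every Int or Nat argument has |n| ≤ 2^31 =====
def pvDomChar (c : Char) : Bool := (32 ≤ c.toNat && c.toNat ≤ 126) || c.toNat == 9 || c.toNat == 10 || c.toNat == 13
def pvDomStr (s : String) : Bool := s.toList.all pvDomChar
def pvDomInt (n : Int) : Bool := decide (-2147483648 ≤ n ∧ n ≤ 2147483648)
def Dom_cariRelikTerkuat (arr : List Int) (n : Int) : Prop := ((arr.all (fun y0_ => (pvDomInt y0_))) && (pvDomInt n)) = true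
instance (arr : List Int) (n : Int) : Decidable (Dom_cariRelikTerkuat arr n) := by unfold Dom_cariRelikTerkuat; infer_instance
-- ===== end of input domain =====

-- B replaces A's nested counting loops by one right-to-left pass that keeps the
-- already-seen suffix sorted (the insertion position is the right-smaller count);
-- objective: alternative (same worst-case cost, different algorithm).

-- ===== PORT A =====
def cariRelikTerkuat (arr : List Int) (n : Int) : Int × Int :=
  -- pyGetD is exact here: Pre_ guarantees every index 0 ≤ i,j < n is in range
  (PySem.List.pyRange 0 n 1).foldl (fun (st : Int × Int) i =>
    let ai := PySem.List.pyGetD arr i 0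
    let count : Int := (PySem.List.pyRange (i + 1) n 1).foldl
      (fun c j => if PySem.List.pyGetD arr j 0 < ai then c + 1 else c) 0
    let v := ai * count
    if v > st.1 then (v, i) else st) (0, -1)

-- ===== PORT B =====
-- the while loop 'pos = 0; while pos < len(seen) and seen[pos] < x: pos += 1'
def pvInsertPos (seen : List Int) (x : Int) : Nat :=
  match seen with
  | [] => 0
  | y :: ys => if y < x then pvInsertPos ys x + 1 else 0

-- loop body: counts.append(pos); seen.insert(pos, x)
def pvStep (st : List Int × List Int) (x : Int) : List Int × List Int :=
  let pos := pvInsertPos st.2 x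
  (st.1 ++ [(pos : Int)], PySem.List.insert st.2 (pos : Int) x)

def cariRelikTerkuat_alt (arr : List Int) (n : Int) : Int × Int :=
  let m : Int := if n > 0 then n else 0
  let pref := PySem.List.slice arr (some 0) (some m)
  let counts := (pref.reverse.foldl pvStep ([], [])).1.reverse
  let sel := (pref.zip counts).foldl (fun (st : Int × Int × Int) xc =>
    let v := xc.1 * xc.2
    if v > st.1 then (v, st.2.2, st.2.2 + 1) else (st.1, st.2.1, st.2.2 + 1)) (0, -1, 0)
  (sel.1, sel.2.1)

-- ===== PRECONDITION & SPEC =====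
-- A indexes arr[i] for every i < n, so it raises IndexError exactly when n > len(arr)
def Pre_cariRelikTerkuat (arr : List Int) (n : Int) : Prop := n ≤ (arr.length : Int)
instance (arr : List Int) (n : Int) : Decidable (Pre_cariRelikTerkuat arr n) := by unfold Pre_cariRelikTerkuat; infer_instance

def pvWitness_cariRelikTerkuat : List Int × Int := ([2, 1], 2)

def Spec_cariRelikTerkuat (arr : List Int) (n : Int) (out : Int × Int) : Prop := out = cariRelikTerkuat_alt arr n
instance (arr : List Int) (n : Int) (out : Int × Int) : Decidable (Spec_cariRelikTerkuat arr n out) := by unfold Spec_cariRelikTerkuat; infer_instance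

-- ===== CLAIM (what is proved, stated in full; the proofs are below) =====
def Claim_equal_cariRelikTerkuat : Prop := ∀ (arr : List Int) (n : Int), Dom_cariRelikTerkuat arr n → Pre_cariRelikTerkuat arr n → Spec_cariRelikTerkuat arr n (cariRelikTerkuat arr n)

-- ===== LEMMAS AND PROOFS =====

-- reference counts: pvRC seen L lists, for each position i of L, the number of
-- elements of (the rest of L after i) ++ seen that are smaller than L[i]
def pvRC (seen : List Int) : List Int → List Int
  | [] => []
  | x :: xs => ((xs ++ seen).countP (fun y => decide (y < x)) : Int) :: pvRC seen xs

-- the counts B's right-to-left loop produces (in emitted, i.e. reversed, order)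
def pvAux (seen : List Int) : List Int → List Int
  | [] => []
  | x :: xs => ((seen.countP (fun y => decide (y < x)) : Int)) :: pvAux (x :: seen) xs

lemma pvInsertPos_le (seen : List Int) (x : Int) : pvInsertPos seen x ≤ seen.length := by
  induction seen with
  | nil => simp [pvInsertPos]
  | cons y ys ih => simp only [pvInsertPos]; split <;> simp [ih]

lemma pvInsertPos_eq (seen : List Int) (x : Int) (hs : seen.Pairwise (· ≤ ·)) :
    pvInsertPos seen x = seen.countP (fun y => decide (y < x)) := by
  induction seen with
  | nil => simp [pvInsertPos]
  | cons y ys ih =>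
    rcases List.pairwise_cons.mp hs with ⟨hy, hys⟩
    simp only [pvInsertPos, List.countP_cons]
    by_cases h : y < x
    · simp [h, ih hys]
    · have h0 : List.countP (fun y => decide (y < x)) ys = 0 := by
        rw [List.countP_eq_zero]
        intro z hz
        simp only [decide_eq_true_eq]
        have := hy z hz
        omega
      simp [h, h0]

lemma pvInsert_sorted (seen : List Int) (x : Int) (hs : seen.Pairwise (· ≤ ·)) :
    (seen.take (pvInsertPos seen x) ++ x :: seen.drop (pvInsertPos seen x)).Pairwise (· ≤ ·) := by
  induction seen with
  | nil => simp [pvInsertPos]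
  | cons y ys ih =>
    rcases List.pairwise_cons.mp hs with ⟨hy, hys⟩
    simp only [pvInsertPos]
    by_cases h : y < x
    · simp only [h, if_pos, List.take_succ_cons, List.drop_succ_cons, List.cons_append]
      refine List.pairwise_cons.mpr ⟨?_, ih hys⟩
      intro z hz
      rcases List.mem_append.mp hz with hz | hz
      · exact hy z (List.mem_of_mem_take hz)
      · rcases List.mem_cons.mp hz with rfl | hz
        · omega
        · exact hy z (List.mem_of_mem_drop hz)
    · rw [if_neg h]
      simp only [List.take_zero, List.drop_zero, List.nil_append]
      refine List.pairwise_cons.mpr ⟨?_, hs⟩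
      intro z hz
      rcases List.mem_cons.mp hz with rfl | hz
      · omega
      · have := hy z hz; omega

lemma pvInsert_perm (seen : List Int) (x : Int) :
    (seen.take (pvInsertPos seen x) ++ x :: seen.drop (pvInsertPos seen x)).Perm (x :: seen) := by
  have h1 : (seen.take (pvInsertPos seen x) ++ x :: seen.drop (pvInsertPos seen x)).Perm
      (x :: (seen.take (pvInsertPos seen x) ++ seen.drop (pvInsertPos seen x))) := List.perm_middle
  rwa [List.take_append_drop] at h1

lemma pvAux_perm (zs : List Int) : ∀ s1 s2 : List Int, s1.Perm s2 → pvAux s1 zs = pvAux s2 zs := by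
  induction zs with
  | nil => intro _ _ _; rfl
  | cons x xs ih =>
    intro s1 s2 hp
    simp only [pvAux]
    rw [hp.countP_eq, ih (x :: s1) (x :: s2) (hp.cons x)]

lemma pvFold_eq (zs : List Int) : ∀ (cs0 seen0 : List Int), seen0.Pairwise (· ≤ ·) →
    (zs.foldl pvStep (cs0, seen0)).1 = cs0 ++ pvAux seen0 zs := by
  induction zs with
  | nil => intro cs0 seen0 _; simp [pvAux]
  | cons x xs ih =>
    intro cs0 seen0 hs
    have hins : PySem.List.insert seen0 ((pvInsertPos seen0 x : Nat) : Int) x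
        = seen0.take (pvInsertPos seen0 x) ++ x :: seen0.drop (pvInsertPos seen0 x) :=
      PySem.List.insert_natCast seen0 (pvInsertPos seen0 x) x (pvInsertPos_le seen0 x)
    simp only [List.foldl_cons, pvStep, hins]
    rw [ih (cs0 ++ [(pvInsertPos seen0 x : Int)]) _ (pvInsert_sorted seen0 x hs)]
    rw [pvAux_perm xs _ (x :: seen0) (pvInsert_perm seen0 x)]
    simp only [pvAux, List.append_assoc, List.singleton_append, pvInsertPos_eq seen0 x hs]

lemma pvRC_append_singleton (ys : List Int) : ∀ (seen : List Int) (x : Int),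
    pvRC seen (ys ++ [x]) = pvRC (x :: seen) ys ++ [((seen.countP (fun y => decide (y < x)) : Nat) : Int)] := by
  induction ys with
  | nil => intro seen x; simp [pvRC]
  | cons a as ih =>
    intro seen x
    simp only [List.cons_append, pvRC, ih, List.cons_append]
    congr 2
    simp [List.countP_append, List.countP_cons]

lemma pvAux_reverse (L : List Int) : ∀ seen : List Int, pvAux seen L.reverse = (pvRC seen L).reverse := by
  induction L using List.reverseRecOn with
  | nil => intro seen; rfl
  | append_singleton ys x ih =>
    intro seen
    rw [List.reverse_append, List.reverse_singleton, List.singleton_append]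
    simp only [pvAux, pvRC_append_singleton, List.reverse_append, List.reverse_singleton,
      List.singleton_append, ih (x :: seen)]

-- A's inner counting loop equals countP of the remaining prefix suffix
lemma pvInner (arr : List Int) (n : Int) (hn : n ≤ (arr.length : Int)) (v : Int) :
    ∀ (D : List Int) (k : Nat) (c0 : Int), D = (arr.take n.toNat).drop k →
    (PySem.List.pyRange (k : Int) n 1).foldl
      (fun c j => if PySem.List.pyGetD arr j 0 < v then c + 1 else c) c0
    = c0 + (D.countP (fun y => decide (y < v)) : Int) := by
  have hm : n.toNat ≤ arr.length := Int.toNat_le.mpr hn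
  have hlen : (arr.take n.toNat).length = n.toNat := by simp [Nat.min_eq_left hm]
  intro D
  induction D with
  | nil =>
    intro k c0 hD
    have hk : n.toNat ≤ k := by
      by_contra hlt
      have : (arr.take n.toNat).drop k ≠ [] := by
        apply List.ne_nil_of_length_pos
        rw [List.length_drop, hlen]; omega
      exact this hD.symm
    rw [PySem.List.pyRange_one_eq_nil (by
      have : (n.toNat : Int) ≤ (k : Int) := by exact_mod_cast hk
      omega)]
    simp
  | cons x D' ih =>
    intro k c0 hD
    have hk : k < n.toNat := by
      by_contra hge
      have : (arr.take n.toNat).drop k = [] := List.drop_eq_nil_of_le (by omega)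
      rw [this] at hD; exact List.cons_ne_nil x D' hD
    have hkl : k < arr.length := lt_of_lt_of_le hk hm
    have hkn : (k : Int) < n := by
      have h1 : (k : Int) < (n.toNat : Int) := by exact_mod_cast hk
      omega
    have hx : arr[k] = x := by
      have h0 : ((arr.take n.toNat).drop k)[0]'(by rw [hD.symm]; simp) = x := by
        simp [hD.symm]
      rw [List.getElem_drop] at h0
      rw [List.getElem_take] at h0
      simpa using h0
    have hD' : D' = (arr.take n.toNat).drop (k + 1) := by
      have h2 : ((arr.take n.toNat).drop k).tail = (arr.take n.toNat).drop (k + 1) := by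
        rw [← List.drop_drop]; simp
      rw [← h2, ← hD]
      rfl
    rw [PySem.List.pyRange_one_cons hkn, List.foldl_cons]
    have hget : PySem.List.pyGetD arr ((k : Nat) : Int) 0 = x := by
      rw [PySem.List.pyGetD_natCast]
      simp [List.getD_eq_getElem?_getD, List.getElem?_eq_getElem hkl, hx]
    have hcast : ((k : Nat) : Int) + 1 = (((k + 1 : Nat)) : Int) := by push_cast; ring
    rw [hget, hcast, ih (k + 1) _ hD', List.countP_cons]
    by_cases h : x < v <;> simp [h] <;> omega

-- A's outer loop from index k equals B's selection fold over the remaining suffix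
lemma pvSel (arr : List Int) (n : Int) (hn : n ≤ (arr.length : Int)) :
    ∀ (P : List Int) (k : Nat) (st : Int × Int), P = (arr.take n.toNat).drop k →
    (PySem.List.pyRange (k : Int) n 1).foldl (fun (st : Int × Int) i =>
      let ai := PySem.List.pyGetD arr i 0
      let count : Int := (PySem.List.pyRange (i + 1) n 1).foldl
        (fun c j => if PySem.List.pyGetD arr j 0 < ai then c + 1 else c) 0
      let v := ai * count
      if v > st.1 then (v, i) else st) st
    = (fun (t : Int × Int × Int) => (t.1, t.2.1))
        ((P.zip (pvRC [] P)).foldl (fun (st : Int × Int × Int) xc =>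
          let v := xc.1 * xc.2
          if v > st.1 then (v, st.2.2, st.2.2 + 1) else (st.1, st.2.1, st.2.2 + 1)) (st.1, st.2, (k : Int))) := by
  have hm : n.toNat ≤ arr.length := Int.toNat_le.mpr hn
  have hlen : (arr.take n.toNat).length = n.toNat := by simp [Nat.min_eq_left hm]
  intro P
  induction P with
  | nil =>
    intro k st hP
    have hk : n.toNat ≤ k := by
      by_contra hlt
      have : (arr.take n.toNat).drop k ≠ [] := by
        apply List.ne_nil_of_length_pos
        rw [List.length_drop, hlen]; omega
      exact this hP.symm
    rw [PySem.List.pyRange_one_eq_nil (by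
      have : (n.toNat : Int) ≤ (k : Int) := by exact_mod_cast hk
      omega)]
    simp
  | cons x P' ih =>
    intro k st hP
    have hk : k < n.toNat := by
      by_contra hge
      have : (arr.take n.toNat).drop k = [] := List.drop_eq_nil_of_le (by omega)
      rw [this] at hP; exact List.cons_ne_nil x P' hP
    have hkl : k < arr.length := lt_of_lt_of_le hk hm
    have hkn : (k : Int) < n := by
      have h1 : (k : Int) < (n.toNat : Int) := by exact_mod_cast hk
      omega
    have hx : arr[k] = x := by
      have h0 : ((arr.take n.toNat).drop k)[0]'(by rw [hP.symm]; simp) = x := by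
        simp [hP.symm]
      rw [List.getElem_drop] at h0
      rw [List.getElem_take] at h0
      simpa using h0
    have hP' : P' = (arr.take n.toNat).drop (k + 1) := by
      have h2 : ((arr.take n.toNat).drop k).tail = (arr.take n.toNat).drop (k + 1) := by
        rw [← List.drop_drop]; simp
      rw [← h2, ← hP]
      rfl
    have hget : PySem.List.pyGetD arr ((k : Nat) : Int) 0 = x := by
      rw [PySem.List.pyGetD_natCast]
      simp [List.getD_eq_getElem?_getD, List.getElem?_eq_getElem hkl, hx]
    have hcast : ((k : Nat) : Int) + 1 = (((k + 1 : Nat)) : Int) := by push_cast; ring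
    rw [PySem.List.pyRange_one_cons hkn, List.foldl_cons]
    simp only [hget, hcast]
    rw [pvInner arr n hn x P' (k + 1) 0 hP']
    simp only [pvRC, List.append_nil, List.zip_cons_cons, List.foldl_cons, zero_add]
    by_cases h : x * (P'.countP (fun y => decide (y < x)) : Int) > st.1
    · simp only [h, if_pos, gt_iff_lt]
      rw [ih (k + 1) _ hP']
      push_cast
      rfl
    · rw [if_neg h, if_neg h]
      rw [ih (k + 1) _ hP']
      push_cast
      rfl

-- ===== VERDICT (by name: the statement is the Claim_ definition above) =====
theorem cariRelikTerkuat_spec : Claim_equal_cariRelikTerkuat := by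
  intro arr n _dom hpre
  unfold Spec_cariRelikTerkuat Pre_cariRelikTerkuat at *
  have hpref : PySem.List.slice arr (some 0) (some (if n > 0 then n else 0)) = arr.take n.toNat := by
    rw [PySem.List.slice_zero_start, PySem.List.slice_to arr (by split <;> omega)]
    congr 1
    split <;> omega
  have hcounts : (((arr.take n.toNat).reverse.foldl pvStep ([], [])).1).reverse = pvRC [] (arr.take n.toNat) := by
    rw [pvFold_eq _ [] [] (by simp), List.nil_append, pvAux_reverse, List.reverse_reverse]
  simp only [cariRelikTerkuat, cariRelikTerkuat_alt, hpref, hcounts]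
  have := pvSel arr n hpre (arr.take n.toNat) 0 (0, -1) (by simp)
  simpa using this
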